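-- pv_equiv track=rewrite | github.com/TheHappyBee/USACP | socdist1.py | find_largest_interior_gap
-- ===== SOURCE A (Python) =====
-- def find_largest_interior_gap(s, gap_start):
--     biggest_gap = 0
--     current_start = -1
--     N = len(s)
--     for i in range(N):
--         if (s[i] == '1'):
--             if (current_start != -1) and (i - current_start > biggest_gap):
--                 biggest_gap = i - current_start
--                 gap_start = current_start
--             current_start = i
--     return biggest_gap, gap_start
-- ===== SOURCE B (Python) =====
-- def find_largest_interior_gap(s, gap_start):
--     # Split the string on '1': parts[0] is the prefix before the first '1',
--     # parts[-1] the suffix after the last one, and each interior part is the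
--     # run of non-'1' characters between two consecutive '1's, so that run's
--     # length + 1 is the gap and a running position tracks the left '1' index.
--     parts = s.split('1')
--     biggest_gap = 0
--     pos = len(parts[0])
--     for seg in parts[1:-1]:
--         gap = len(seg) + 1
--         if gap > biggest_gap:
--             biggest_gap = gap
--             gap_start = pos
--         pos += gap
--     return biggest_gap, gap_start
-- ===== Notes on version B (the rewrite author's own statement) =====
-- stated objective: faster
-- what changed: B splits the string on '1' and folds over the interior parts (each part's length + 1 is a gap, a running position tracks the left '1' index), instead of A's indexed character scan carrying a previous-'1' sentinel state (-1).
import Mathlib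
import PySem

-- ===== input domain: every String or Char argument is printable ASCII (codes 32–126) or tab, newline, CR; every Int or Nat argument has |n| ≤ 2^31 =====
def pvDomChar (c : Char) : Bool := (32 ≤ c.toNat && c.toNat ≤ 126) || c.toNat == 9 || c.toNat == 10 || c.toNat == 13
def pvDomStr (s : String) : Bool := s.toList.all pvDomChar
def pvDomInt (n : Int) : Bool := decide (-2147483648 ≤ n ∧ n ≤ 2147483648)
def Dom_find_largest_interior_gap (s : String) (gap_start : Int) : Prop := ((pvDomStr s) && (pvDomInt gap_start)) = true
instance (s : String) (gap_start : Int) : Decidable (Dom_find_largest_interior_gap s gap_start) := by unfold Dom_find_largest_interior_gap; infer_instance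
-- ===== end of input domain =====

-- B replaces A's indexed character scan with sentinel state (-1) by splitting the string on
-- '1' and folding over the interior parts with a running position; objective: faster (same
-- O(n), but the per-character work moves into str.split; measured faster by the timing
-- run). Both programs are total.

-- ===== PORT A =====
-- A's loop body: state (biggest_gap, gap_start, current_start), one step per character.
def pvStepA (st : Int × Int × Int) (p : Int × Char) : Int × Int × Int :=
  match st, p with
  | (bg, gs, cs), (i, c) =>
    if c = '1' then
      if cs ≠ -1 ∧ i - cs > bg then (i - cs, cs, i)
      else (bg, gs, i)
    else (bg, gs, cs)

def find_largest_interior_gap (s : String) (gap_start : Int) : Int × Int :=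
  let st := (PySem.List.enumerate s.toList).foldl pvStepA (0, gap_start, -1)
  (st.1, st.2.1)

-- ===== PORT B =====
-- B's loop body over one interior part: state (biggest_gap, gap_start, pos).
def pvSegStep (st : Int × Int × Int) (seg : List Char) : Int × Int × Int :=
  let gap : Int := (seg.length : Int) + 1
  if gap > st.1 then (gap, st.2.2, st.2.2 + gap) else (st.1, st.2.1, st.2.2 + gap)

def find_largest_interior_gap_alt (s : String) (gap_start : Int) : Int × Int :=
  let parts := PySem.Chars.splitOn s.toList ['1']   -- s.split('1')
  -- parts is never empty (split always yields at least one part), so parts[0] is headD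
  let st := (PySem.List.slice parts (some 1) (some (-1))).foldl pvSegStep
              (0, gap_start, ((parts.headD []).length : Int))
  (st.1, st.2.1)

-- ===== PRECONDITION & SPEC =====
def Spec_find_largest_interior_gap (s : String) (gap_start : Int) (out : Int × Int) : Prop := out = find_largest_interior_gap_alt s gap_start
instance (s : String) (gap_start : Int) (out : Int × Int) : Decidable (Spec_find_largest_interior_gap s gap_start out) := by unfold Spec_find_largest_interior_gap; infer_instance

-- ===== CLAIM (what is proved, stated in full; the proofs are below) =====
def Claim_equal_find_largest_interior_gap : Prop := ∀ (s : String) (gap_start : Int), Dom_find_largest_interior_gap s gap_start → Spec_find_largest_interior_gap s gap_start (find_largest_interior_gap s gap_start)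

-- ===== LEMMAS AND PROOFS =====

-- the common ground both ports are reduced to: the fold over consecutive '1'-index pairs
def pvStepB (st : Int × Int) (pq : Int × Int) : Int × Int :=
  if pq.2 - pq.1 > st.1 then (pq.2 - pq.1, pq.1) else st

-- '1'-indices of an enumerated fragment
def pvPos (el : List (Int × Char)) : List Int :=
  el.filterMap (fun p => if p.2 = '1' then some p.1 else none)

theorem pvPos_cons_one (i : Int) (tl : List (Int × Char)) :
    pvPos ((i, '1') :: tl) = i :: pvPos tl := by simp [pvPos]

theorem pvPos_cons_other {ch : Char} (hch : ch ≠ '1') (i : Int) (tl : List (Int × Char)) :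
    pvPos ((i, ch) :: tl) = pvPos tl := by simp [pvPos, hch]

theorem pvStepA_one (bg gs c i : Int) :
    pvStepA (bg, gs, c) (i, '1')
      = if c ≠ -1 ∧ i - c > bg then (i - c, c, i) else (bg, gs, i) := by
  simp [pvStepA]

theorem pvStepA_other {ch : Char} (hch : ch ≠ '1') (bg gs c i : Int) :
    pvStepA (bg, gs, c) (i, ch) = (bg, gs, c) := by simp [pvStepA, hch]

theorem pvStepB_pair (bg gs c i : Int) :
    pvStepB (bg, gs) (c, i) = if i - c > bg then (i - c, c) else (bg, gs) := by
  simp [pvStepB]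

-- Running A's loop with a real previous-'1' index c equals running the pair fold over the
-- consecutive pairs of (c :: positions).
theorem pvLoop_some (el : List (Int × Char)) (hnn : ∀ p ∈ el, 0 ≤ p.1) :
    ∀ (bg gs c : Int), c ≠ -1 →
    (((el.foldl pvStepA (bg, gs, c)).1, (el.foldl pvStepA (bg, gs, c)).2.1)
      = (List.zip (c :: pvPos el) (pvPos el)).foldl pvStepB (bg, gs)) := by
  induction el with
  | nil => intro bg gs c hc; simp [pvPos]
  | cons hd tl ih =>
    intro bg gs c hc
    obtain ⟨i, ch⟩ := hd
    have hi : (0:Int) ≤ i := hnn (i, ch) (by simp)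
    have htl : ∀ p ∈ tl, 0 ≤ p.1 := fun p hp => hnn p (by simp [hp])
    by_cases hch : ch = '1'
    · subst hch
      rw [pvPos_cons_one, List.foldl_cons, pvStepA_one, List.zip_cons_cons,
        List.foldl_cons, pvStepB_pair]
      by_cases hgt : i - c > bg
      · rw [if_pos ⟨hc, hgt⟩, if_pos hgt]
        exact ih htl (i - c) c i (by omega)
      · rw [if_neg (fun h => hgt h.2), if_neg hgt]
        exact ih htl bg gs i (by omega)
    · rw [pvPos_cons_other hch, List.foldl_cons, pvStepA_other hch]
      exact ih htl bg gs c hc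

-- Running A's loop from the sentinel state (-1) equals the pair fold over consecutive pairs.
theorem pvLoop_none (el : List (Int × Char)) (hnn : ∀ p ∈ el, 0 ≤ p.1) :
    ∀ (bg gs : Int),
    (((el.foldl pvStepA (bg, gs, -1)).1, (el.foldl pvStepA (bg, gs, -1)).2.1)
      = (List.zip (pvPos el) (pvPos el).tail).foldl pvStepB (bg, gs)) := by
  induction el with
  | nil => intro bg gs; simp [pvPos]
  | cons hd tl ih =>
    intro bg gs
    obtain ⟨i, ch⟩ := hd
    have hi : (0:Int) ≤ i := hnn (i, ch) (by simp)
    have htl : ∀ p ∈ tl, 0 ≤ p.1 := fun p hp => hnn p (by simp [hp])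
    by_cases hch : ch = '1'
    · subst hch
      rw [pvPos_cons_one, List.foldl_cons, pvStepA_one,
        if_neg (fun h => h.1 rfl)]
      simpa using pvLoop_some tl htl bg gs i (by omega)
    · rw [pvPos_cons_other hch, List.foldl_cons, pvStepA_other hch]
      exact ih htl bg gs

-- ---------- B side: characterising split on a single character ----------

-- structural form of s.split(ch) carrying the current (un-reversed) part
def pvSplitChar (ch : Char) (pre : List Char) : List Char → List (List Char)
  | [] => [pre]
  | c :: rest => if c = ch then pre :: pvSplitChar ch [] rest else pvSplitChar ch (pre ++ [c]) rest

theorem pvSplitChar_ne_nil (ch : Char) (pre l : List Char) : pvSplitChar ch pre l ≠ [] := by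
  induction l generalizing pre with
  | nil => simp [pvSplitChar]
  | cons c rest ih =>
    by_cases h : c = ch <;> simp [pvSplitChar, h, ih]

theorem pvSplitOn_go_char (ch : Char) :
    ∀ (l : List Char) (fuel : Nat) (cur : List Char) (acc : List (List Char)),
      l.length ≤ fuel →
      PySem.Chars.splitOn.go [ch] fuel l cur acc = acc.reverse ++ pvSplitChar ch cur.reverse l := by
  intro l
  induction l with
  | nil =>
    intro fuel cur acc _
    cases fuel <;> simp [PySem.Chars.splitOn.go, pvSplitChar]
  | cons c rest ih =>
    intro fuel cur acc hf
    cases fuel with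
    | zero => simp at hf
    | succ f =>
      by_cases h : c = ch
      · subst h
        rw [show PySem.Chars.splitOn.go [c] (f+1) (c :: rest) cur acc
              = PySem.Chars.splitOn.go [c] f rest [] (cur.reverse :: acc) by
            simp [PySem.Chars.splitOn.go, List.isPrefixOf]]
        rw [ih f [] (cur.reverse :: acc) (by simpa using hf)]
        simp [pvSplitChar]
      · rw [show PySem.Chars.splitOn.go [ch] (f+1) (c :: rest) cur acc
              = PySem.Chars.splitOn.go [ch] f rest (c :: cur) acc by
            simp [PySem.Chars.splitOn.go, List.isPrefixOf]
            exact fun hc => absurd hc.symm h]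
        rw [ih f (c :: cur) acc (by simpa using hf)]
        simp [pvSplitChar, h]

theorem pvSplitOn_char (ch : Char) (l : List Char) :
    PySem.Chars.splitOn l [ch] = pvSplitChar ch [] l := by
  have := pvSplitOn_go_char ch l (l.length + 1) [] [] (by omega)
  simpa [PySem.Chars.splitOn] using this

-- xs[1:-1] is tail + dropLast
theorem pvSlice_one_neg_one {α : Type} (xs : List α) :
    PySem.List.slice xs (some 1) (some (-1)) = xs.tail.dropLast := by
  cases xs with
  | nil => rfl
  | cons a t =>
    simp [PySem.List.slice, PySem.List.clampIdx, List.dropLast_eq_take]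
    split_ifs <;> omega

-- '1'-positions of a character list, base index i (recursive form of pvPos ∘ enumerate)
def pvOnesI (l : List Char) (i : Int) : List Int :=
  match l with
  | [] => []
  | c :: r => if c = '1' then i :: pvOnesI r (i + 1) else pvOnesI r (i + 1)

theorem pvOnesI_eq_pvPos (l : List Char) : ∀ (i : Int),
    pvPos (PySem.List.enumerate l i) = pvOnesI l i := by
  induction l with
  | nil => intro i; simp [pvPos, pvOnesI, PySem.List.enumerate]
  | cons c r ih =>
    intro i
    rw [show PySem.List.enumerate (c :: r) i = (i, c) :: PySem.List.enumerate r (i+1) from rfl]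
    by_cases h : c = '1'
    · subst h; rw [pvPos_cons_one, ih]; simp [pvOnesI]
    · rw [pvPos_cons_other h, ih]; simp [pvOnesI, h]

-- alignment: part lengths against consecutive '1' indices (q = p + len(seg) + 1 chains)
def pvAligned (p : Int) : List (List Char) → List Int → Prop
  | [], [] => True
  | seg :: segs, q :: qs => q = p + seg.length + 1 ∧ pvAligned q segs qs
  | _, _ => False

theorem pvAligned_split :
    ∀ (l pre : List Char) (p : Int),
      pvAligned p ((pvSplitChar '1' pre l).dropLast) (pvOnesI l (p + 1 + pre.length)) := by
  intro l
  induction l with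
  | nil => intro pre p; simp [pvSplitChar, pvOnesI, pvAligned]
  | cons c r ih =>
    intro pre p
    by_cases h : c = '1'
    · subst h
      rw [show pvSplitChar '1' pre ('1' :: r) = pre :: pvSplitChar '1' [] r by simp [pvSplitChar]]
      rw [List.dropLast_cons_of_ne_nil (pvSplitChar_ne_nil '1' [] r)]
      rw [show pvOnesI ('1' :: r) (p + 1 + pre.length) = (p + 1 + pre.length) :: pvOnesI r (p + 1 + pre.length + 1) by simp [pvOnesI]]
      refine ⟨by ring, ?_⟩
      have := ih [] (p + 1 + (pre.length : Int))
      simpa using this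
    · rw [show pvSplitChar '1' pre (c :: r) = pvSplitChar '1' (pre ++ [c]) r by simp [pvSplitChar, h]]
      rw [show pvOnesI (c :: r) (p + 1 + pre.length) = pvOnesI r (p + 1 + pre.length + 1) by simp [pvOnesI, h]]
      have := ih (pre ++ [c]) p
      simpa [add_assoc] using this

-- the aligned fold over interior parts is the pair fold
theorem pvFoldSeg_eq_pairs :
    ∀ (segs : List (List Char)) (qs : List Int) (p bg gs : Int),
      pvAligned p segs qs →
      (((segs.foldl pvSegStep (bg, gs, p)).1, (segs.foldl pvSegStep (bg, gs, p)).2.1)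
        = (List.zip (p :: qs) qs).foldl pvStepB (bg, gs)) := by
  intro segs
  induction segs with
  | nil =>
    intro qs p bg gs hal
    cases qs with
    | nil => simp
    | cons q qs => exact absurd hal (by simp [pvAligned])
  | cons seg segs ih =>
    intro qs p bg gs hal
    cases qs with
    | nil => exact absurd hal (by simp [pvAligned])
    | cons q qs =>
      obtain ⟨hq, hal'⟩ := hal
      rw [List.foldl_cons, List.zip_cons_cons, List.foldl_cons, pvStepB_pair]
      have hgap : (seg.length : Int) + 1 = q - p := by omega
      by_cases hgt : q - p > bg
      · rw [show pvSegStep (bg, gs, p) seg = (q - p, p, q) by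
            simp only [pvSegStep]; rw [hgap, if_pos hgt]; simp]
        rw [if_pos hgt]
        exact ih qs q (q - p) p hal'
      · rw [show pvSegStep (bg, gs, p) seg = (bg, gs, q) by
            simp only [pvSegStep]; rw [hgap, if_neg hgt]; simp]
        rw [if_neg hgt]
        exact ih qs q bg gs hal'

-- B's whole computation, generalized over the pending part 'pre', equals the pair fold
theorem pvAltLoop (l : List Char) : ∀ (pre : List Char) (bg gs : Int),
    (let parts := pvSplitChar '1' pre l
     let st := parts.tail.dropLast.foldl pvSegStep (bg, gs, ((parts.headD []).length : Int))
     (st.1, st.2.1))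
      = (List.zip (pvOnesI l (pre.length : Int)) (pvOnesI l (pre.length : Int)).tail).foldl pvStepB (bg, gs) := by
  induction l with
  | nil => intro pre bg gs; simp [pvSplitChar, pvOnesI]
  | cons c r ih =>
    intro pre bg gs
    by_cases h : c = '1'
    · subst h
      rw [show pvSplitChar '1' pre ('1' :: r) = pre :: pvSplitChar '1' [] r by simp [pvSplitChar]]
      rw [show pvOnesI ('1' :: r) (pre.length : Int) = (pre.length : Int) :: pvOnesI r (pre.length + 1) by simp [pvOnesI]]
      simp only [List.tail_cons, List.headD_cons]
      have hal : pvAligned (pre.length : Int) ((pvSplitChar '1' [] r).dropLast) (pvOnesI r (pre.length + 1)) := by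
        have := pvAligned_split r [] (pre.length : Int)
        simpa using this
      simpa using pvFoldSeg_eq_pairs ((pvSplitChar '1' [] r).dropLast) _ _ bg gs hal
    · rw [show pvSplitChar '1' pre (c :: r) = pvSplitChar '1' (pre ++ [c]) r by simp [pvSplitChar, h]]
      rw [show pvOnesI (c :: r) (pre.length : Int) = pvOnesI r (pre.length + 1) by simp [pvOnesI, h]]
      have := ih (pre ++ [c]) bg gs
      simpa [add_comm] using this

-- ===== VERDICT (by name: the statement is the Claim_ definition above) =====
theorem find_largest_interior_gap_spec : Claim_equal_find_largest_interior_gap := by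
  intro s gap_start _
  unfold Spec_find_largest_interior_gap find_largest_interior_gap find_largest_interior_gap_alt
  have hnn : ∀ p ∈ PySem.List.enumerate s.toList 0, 0 ≤ p.1 := by
    intro p hp
    rcases (PySem.List.mem_enumerate_iff _ _ _).1 hp with ⟨k, hk, rfl⟩
    simp
  have hA := pvLoop_none (PySem.List.enumerate s.toList) hnn 0 gap_start
  have hB := pvAltLoop s.toList [] 0 gap_start
  simp only [List.length_nil, Int.natCast_zero, ← pvOnesI_eq_pvPos] at hB
  simp only [pvSplitOn_char, pvSlice_one_neg_one]
  exact hA.trans hB.symm
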